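-- pv_equiv track=rewrite | github.com/tkong9/ACSL-Sr | Past_Exams/43/triangle3.py | solve
-- ===== SOURCE A (Python) =====
-- def decimal_to_octal(n):
--     return oct(n)[2:]
--
-- def solve(s, d, r):
--     s = d * (r - 1) * r // 2 + s
--
--     first_num_of_last_row = s
--     sum_of_last_row = 0
--     for i in range(r):
--         octal = decimal_to_octal(first_num_of_last_row)
--         sum_of_last_row += sum(map(int, octal))
--         first_num_of_last_row += d
--
--     return sum_of_last_row
-- ===== SOURCE B (Python) =====
-- def _octal_digit_sum(n):
--     t = 0
--     while n > 0:
--         t += n % 8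
--         n //= 8
--     return t
--
-- def solve(s, d, r):
--     s = d * (r - 1) * r // 2 + s
--     return sum(_octal_digit_sum(s + d * i) for i in range(r))
-- ===== Notes on version B (the rewrite author's own statement) =====
-- stated objective: simpler
-- what changed: B replaces A's octal-string construction (oct(n)[2:]) and per-character int() parsing with a direct divmod loop extracting octal digits arithmetically, and replaces the mutating accumulator loop with a sum over a generator.
import Mathlib
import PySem

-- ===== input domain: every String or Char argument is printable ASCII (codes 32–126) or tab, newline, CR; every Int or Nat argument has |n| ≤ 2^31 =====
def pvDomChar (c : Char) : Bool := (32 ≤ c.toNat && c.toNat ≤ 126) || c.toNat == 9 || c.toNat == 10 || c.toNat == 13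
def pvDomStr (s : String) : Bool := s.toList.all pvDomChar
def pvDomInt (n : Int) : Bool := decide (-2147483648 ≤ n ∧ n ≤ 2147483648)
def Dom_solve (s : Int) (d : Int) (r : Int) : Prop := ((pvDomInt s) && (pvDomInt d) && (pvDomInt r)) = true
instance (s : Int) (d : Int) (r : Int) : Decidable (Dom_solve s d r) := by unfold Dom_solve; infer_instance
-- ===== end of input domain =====

-- B replaces A's octal-string construction (oct(n)[2:]) and per-character int() parsing with a
-- direct divmod digit loop summed over the progression (objective: simpler). Equivalence is on
-- Pre_ (all progression terms ≥ 0), where A returns instead of raising ValueError.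

-- ===== PORT A =====
-- octal digit characters of n, most significant first (oct(n)[2:] for 0 ≤ n; fuel = n bounds the
-- division chain and is never exhausted since n/8 < n; Pre_ excludes negative arguments, where
-- Python's int() on the character 'o' of '-0o…' raises ValueError)
def octCharsAux : Nat → Nat → List Char
  | 0, _ => []
  | f + 1, n => if n = 0 then [] else octCharsAux f (n / 8) ++ [Char.ofNat (n % 8 + 48)]

def decimal_to_octal (n : Int) : List Char :=
  if n = 0 then ['0'] else octCharsAux n.toNat n.toNat

-- int(c) on the digit characters produced above is c.toNat - 48 (exact for digit chars)
def solve (s : Int) (d : Int) (r : Int) : Int :=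
  let s' := PySem.Int.floordiv (d * (r - 1) * r) 2 + s
  ((PySem.List.pyRange 0 r 1).foldl
    (fun st _ =>
      let octal := decimal_to_octal st.1
      (st.1 + d, st.2 + (octal.map (fun c => ((c.toNat : Int) - 48))).sum))
    (s', 0)).2

-- ===== PORT B =====
-- Source B's while-loop runs only while n > 0 and returns 0 otherwise, so recursion on n.toNat with
-- fuel n.toNat (never exhausted since n/8 < n) is exact
def odsAux : Nat → Nat → Int
  | 0, _ => 0
  | f + 1, n => if n = 0 then 0 else (↑(n % 8) : Int) + odsAux f (n / 8)

def octalDigitSum (n : Int) : Int := odsAux n.toNat n.toNat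

def solve_alt (s : Int) (d : Int) (r : Int) : Int :=
  let s' := PySem.Int.floordiv (d * (r - 1) * r) 2 + s
  ((PySem.List.pyRange 0 r 1).map (fun i => octalDigitSum (s' + d * i))).sum

-- ===== PRECONDITION & SPEC =====
-- Pre_ excludes inputs where some term s' + d*i (0 ≤ i < r) of the progression is negative:
-- there A raises ValueError (oct() yields '-0o…' and int('o') fails). The terms are linear in i,
-- so nonnegativity at the two endpoints is equivalent to nonnegativity of every term.
def Pre_solve (s : Int) (d : Int) (r : Int) : Prop :=
  0 < r → (0 ≤ PySem.Int.floordiv (d * (r - 1) * r) 2 + s ∧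
           0 ≤ PySem.Int.floordiv (d * (r - 1) * r) 2 + s + d * (r - 1))
instance (s : Int) (d : Int) (r : Int) : Decidable (Pre_solve s d r) := by
  unfold Pre_solve; infer_instance
def pvWitness_solve : Int × Int × Int := (3, 2, 5)

def Spec_solve (s : Int) (d : Int) (r : Int) (out : Int) : Prop := out = solve_alt s d r
instance (s : Int) (d : Int) (r : Int) (out : Int) : Decidable (Spec_solve s d r out) := by
  unfold Spec_solve; infer_instance

-- ===== CLAIM (what is proved, stated in full; the proofs are below) =====
def Claim_equal_solve : Prop := ∀ (s : Int) (d : Int) (r : Int), Dom_solve s d r → Pre_solve s d r → Spec_solve s d r (solve s d r)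

-- ===== LEMMAS AND PROOFS =====

-- the character written for each octal digit reads back as that digit
lemma char_digit_val (m : Nat) (hm : m < 8) :
    ((Char.ofNat (m + 48)).toNat : Int) - 48 = (m : Int) := by
  interval_cases m <;> decide

-- A's string digit sum equals B's arithmetic digit sum, at any sufficient fuel
lemma aux_sum_eq : ∀ (f n : Nat), n ≤ f →
    ((octCharsAux f n).map (fun c => ((c.toNat : Int) - 48))).sum = odsAux f n := by
  intro f
  induction f with
  | zero => intro n _; simp [octCharsAux, odsAux]
  | succ f ih =>
    intro n hn
    by_cases h : n = 0
    · simp [h, octCharsAux, odsAux]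
    · rw [octCharsAux, odsAux, if_neg h, if_neg h]
      simp only [List.map_append, List.sum_append, List.map_cons, List.map_nil,
        List.sum_cons, List.sum_nil]
      have hf : n / 8 ≤ f := by
        have := Nat.div_lt_self (Nat.pos_of_ne_zero h) (show 1 < 8 by omega)
        omega
      rw [ih (n / 8) hf, char_digit_val (n % 8) (Nat.mod_lt _ (by omega))]
      ring

lemma dsum_eq (n : Int) :
    ((decimal_to_octal n).map (fun c => ((c.toNat : Int) - 48))).sum = octalDigitSum n := by
  unfold decimal_to_octal octalDigitSum
  by_cases h : n = 0
  · simp [h, odsAux]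
  · rw [if_neg h]
    exact aux_sum_eq n.toNat n.toNat le_rfl

-- the running first-number component of A's fold
lemma fold_fst (d : Int) (l : List Int) : ∀ (num acc : Int),
    ((l.foldl
      (fun st (_ : Int) =>
        (st.1 + d, st.2 + ((decimal_to_octal st.1).map (fun c => ((c.toNat : Int) - 48))).sum))
      (num, acc)).1) = num + d * l.length := by
  induction l with
  | nil => intro num acc; simp
  | cons x xs ih =>
    intro num acc
    simp only [List.foldl_cons, ih, List.length_cons]
    push_cast
    ring

-- A's fold accumulates exactly B's per-term digit sums
lemma fold_eq (d : Int) (n : Nat) : ∀ (num acc : Int),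
    (((List.range n).map (fun (k : Nat) => (k : Int))).foldl
      (fun st (_ : Int) =>
        (st.1 + d, st.2 + ((decimal_to_octal st.1).map (fun c => ((c.toNat : Int) - 48))).sum))
      (num, acc)).2
    = acc + ((List.range n).map (fun k : Nat => octalDigitSum (num + d * (k : Int)))).sum := by
  induction n with
  | zero => intro num acc; simp
  | succ n ih =>
    intro num acc
    rw [List.range_succ]
    simp only [List.map_append, List.foldl_append, List.map_cons, List.map_nil,
      List.foldl_cons, List.foldl_nil, List.sum_append, List.sum_cons, List.sum_nil]
    rw [ih num acc, fold_fst d, dsum_eq]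
    simp only [List.length_map, List.length_range]
    ring

-- ===== VERDICT (by name: the statement is the Claim_ definition above) =====
theorem solve_spec : Claim_equal_solve := by
  intro s d r _ _
  unfold Spec_solve
  simp only [solve, solve_alt]
  rw [PySem.List.pyRange_one]
  simp only [Int.sub_zero, List.map_map, Function.comp_def, zero_add]
  rw [fold_eq d r.toNat]
  ring
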